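-- pv_equiv track=rewrite | github.com/metemertb/Bionformatics-Local-and-Global-Alignment-Algorithms | main.py | find_highest_index
-- ===== SOURCE A (Python) =====
-- def find_highest_index(matrix):
--     value_list = []
--     index1 = 0
--     index2 = 0
--     for k in range(2, len(matrix)):
--         for j in range(2, len(matrix[0])):
--             value_list.append(int(matrix[k][j]))
--     target = max(value_list)
--     for k in range(2, len(matrix)):
--         for j in range(2, len(matrix[0])):
--             if int(matrix[k][j]) == target and index1 == 0:
--                 index1 += k
--                 index2 += j
--
--     return index1, index2, target
-- ===== SOURCE B (Python) =====
-- def find_highest_index(matrix):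
--     # single pass keeping the first (row-major) strictly-greatest entry
--     best = None
--     for k in range(2, len(matrix)):
--         row = matrix[k]
--         for j in range(2, len(matrix[0])):
--             v = int(row[j])
--             if best is None or v > best[2]:
--                 best = (k, j, v)
--     if best is None:
--         raise ValueError("empty submatrix")
--     return best
-- ===== Notes on version B (the rewrite author's own statement) =====
-- stated objective: faster
-- what changed: Single pass keeping a running (row, col, value) best with strict '>' instead of building a value list, taking max, then rescanning the matrix for the first occurrence.
import Mathlib
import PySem

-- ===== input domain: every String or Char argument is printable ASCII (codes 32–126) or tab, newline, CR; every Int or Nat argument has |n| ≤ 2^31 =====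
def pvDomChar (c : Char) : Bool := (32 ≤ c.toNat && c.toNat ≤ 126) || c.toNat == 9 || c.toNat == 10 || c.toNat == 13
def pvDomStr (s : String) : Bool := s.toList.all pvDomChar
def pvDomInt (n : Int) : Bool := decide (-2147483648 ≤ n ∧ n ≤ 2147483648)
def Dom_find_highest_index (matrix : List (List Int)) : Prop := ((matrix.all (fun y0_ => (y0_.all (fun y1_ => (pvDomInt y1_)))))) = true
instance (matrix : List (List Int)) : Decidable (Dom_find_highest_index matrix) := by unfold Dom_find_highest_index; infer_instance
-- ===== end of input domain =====

-- B replaces A's three traversals (collect all submatrix values, max(), rescan for the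
-- first index of the max) by one pass keeping a running (row, col, value) best.

-- ===== PORT A =====
def find_highest_index (matrix : List (List Int)) : Int × Int × Int :=
  let value_list : List Int :=
    (PySem.List.pyRange 2 (matrix.length : Int) 1).foldl (fun acc k =>
      (PySem.List.pyRange 2 ((matrix.headD []).length : Int) 1).foldl (fun acc j =>
        acc ++ [(PySem.List.pyGet? ((PySem.List.pyGet? matrix k).getD []) j).getD 0]) acc) []
  let target : Int := (PySem.List.max? value_list (fun x => x)).getD 0
  let p : Int × Int :=
    (PySem.List.pyRange 2 (matrix.length : Int) 1).foldl (fun p k =>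
      (PySem.List.pyRange 2 ((matrix.headD []).length : Int) 1).foldl (fun (p : Int × Int) j =>
        if (PySem.List.pyGet? ((PySem.List.pyGet? matrix k).getD []) j).getD 0 = target ∧ p.1 = 0
        then (p.1 + k, p.2 + j) else p) p) ((0 : Int), (0 : Int))
  (p.1, p.2, target)

-- ===== PORT B =====
def find_highest_index_alt (matrix : List (List Int)) : Int × Int × Int :=
  let best : Option (Int × Int × Int) :=
    (PySem.List.pyRange 2 (matrix.length : Int) 1).foldl (fun b k =>
      let row := (PySem.List.pyGet? matrix k).getD []
      (PySem.List.pyRange 2 ((matrix.headD []).length : Int) 1).foldl (fun b j =>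
        let v := (PySem.List.pyGet? row j).getD 0
        match b with
        | none => some (k, j, v)
        | some c => if v > c.2.2 then some (k, j, v) else b) b) none
  best.getD (0, 0, 0)

-- ===== PRECONDITION & SPEC =====
-- Pre_ excludes exactly the inputs where A raises: fewer than 3 rows or fewer than 3 columns
-- in row 0 (ValueError from max of an empty value list), and rows 2.. shorter than row 0 (IndexError).
def Pre_find_highest_index (matrix : List (List Int)) : Prop :=
  2 < matrix.length ∧ 2 < (matrix.headD []).length ∧
    ∀ row ∈ matrix.drop 2, (matrix.headD []).length ≤ row.length
instance (matrix : List (List Int)) : Decidable (Pre_find_highest_index matrix) := by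
  unfold Pre_find_highest_index; infer_instance

def pvWitness_find_highest_index : List (List Int) :=
  [[0, 0, 0], [0, 0, 0], [5, 6, 7]]

def Spec_find_highest_index (matrix : List (List Int)) (out : Int × Int × Int) : Prop := out = find_highest_index_alt matrix
instance (matrix : List (List Int)) (out : Int × Int × Int) : Decidable (Spec_find_highest_index matrix out) := by unfold Spec_find_highest_index; infer_instance

-- ===== CLAIM (what is proved, stated in full; the proofs are below) =====
def Claim_equal_find_highest_index : Prop := ∀ (matrix : List (List Int)), Dom_find_highest_index matrix → Pre_find_highest_index matrix → Spec_find_highest_index matrix (find_highest_index matrix)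

-- ===== LEMMAS AND PROOFS =====

-- the value read at (k, j) by both ports
def pvVal (matrix : List (List Int)) (k j : Int) : Int :=
  (PySem.List.pyGet? ((PySem.List.pyGet? matrix k).getD []) j).getD 0

-- the (row, col, value) entries of the submatrix in row-major order
def pvEntries (matrix : List (List Int)) : List (Int × Int × Int) :=
  (PySem.List.pyRange 2 (matrix.length : Int) 1).flatMap (fun k =>
    (PySem.List.pyRange 2 ((matrix.headD []).length : Int) 1).map (fun j => (k, j, pvVal matrix k j)))

-- B's running best, A's first-match step, and the running max of values
def pvPick (c e : Int × Int × Int) : Int × Int × Int := if e.2.2 > c.2.2 then e else c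
def pvStepA (t : Int) (p : Int × Int) (e : Int × Int × Int) : Int × Int :=
  if e.2.2 = t ∧ p.1 = 0 then (p.1 + e.1, p.2 + e.2.1) else p

lemma pvFoldB_some (l : List (Int × Int × Int)) (b : Int × Int × Int) :
    l.foldl (fun b e => match b with
      | none => some e
      | some c => if e.2.2 > c.2.2 then some e else b) (some b) = some (l.foldl pvPick b) := by
  induction l generalizing b with
  | nil => rfl
  | cons e t ih =>
    simp only [List.foldl_cons, pvPick]
    split <;> exact ih _

lemma pvPick_val (l : List (Int × Int × Int)) (b : Int × Int × Int) :
    (l.foldl pvPick b).2.2 = l.foldl (fun a e => max a e.2.2) b.2.2 := by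
  induction l generalizing b with
  | nil => rfl
  | cons e t ih =>
    simp only [List.foldl_cons, pvPick]
    rw [ih]
    split <;> [rw [max_eq_right (by omega)]; rw [max_eq_left (by omega)]]

-- the single-pass strict-'>' best IS the first element attaining the running max
lemma pvPick_find (l : List (Int × Int × Int)) (b : Int × Int × Int) :
    (b :: l).find? (fun e => decide (e.2.2 = l.foldl (fun a e => max a e.2.2) b.2.2)) =
      some (l.foldl pvPick b) := by
  induction l generalizing b with
  | nil => simp
  | cons e t ih =>
    by_cases h : e.2.2 > b.2.2
    · have hM : (e :: t).foldl (fun a e => max a e.2.2) b.2.2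
          = t.foldl (fun a e => max a e.2.2) e.2.2 := by
        simp only [List.foldl_cons]; rw [max_eq_right (by omega)]
      have hble : e.2.2 ≤ t.foldl (fun a e => max a e.2.2) e.2.2 :=
        (PySem.List.le_foldl_max_int t (fun e => e.2.2) e.2.2).1
      have hb : ¬ (b.2.2 = t.foldl (fun a e => max a e.2.2) e.2.2) := by omega
      rw [hM, List.find?_cons_of_neg (by simpa using hb)]
      have := ih e
      rw [this]
      simp only [List.foldl_cons, pvPick, if_pos h]
    · have hM : (e :: t).foldl (fun a e => max a e.2.2) b.2.2
          = t.foldl (fun a e => max a e.2.2) b.2.2 := by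
        simp only [List.foldl_cons]; rw [max_eq_left (by omega)]
      rw [hM]
      have hfold : (e :: t).foldl pvPick b = t.foldl pvPick b := by
        simp only [List.foldl_cons, pvPick, if_neg h]
      rw [hfold]
      by_cases hb : b.2.2 = t.foldl (fun a e => max a e.2.2) b.2.2
      · rw [List.find?_cons_of_pos (by simpa using hb)]
        have := ih b
        rw [List.find?_cons_of_pos (by simpa using hb)] at this
        exact this
      · have hbe : b.2.2 ≤ t.foldl (fun a e => max a e.2.2) b.2.2 :=
          (PySem.List.le_foldl_max_int t (fun e => e.2.2) b.2.2).1
        have he : ¬ (e.2.2 = t.foldl (fun a e => max a e.2.2) b.2.2) := by omega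
        rw [List.find?_cons_of_neg (by simpa using hb), List.find?_cons_of_neg (by simpa using he)]
        have := ih b
        rw [List.find?_cons_of_neg (by simpa using hb)] at this
        exact this

lemma pvFoldA_frozen (t : Int) (l : List (Int × Int × Int)) (p : Int × Int) (hp : p.1 ≠ 0) :
    l.foldl (pvStepA t) p = p := by
  induction l with
  | nil => rfl
  | cons e r ih =>
    simp only [List.foldl_cons, pvStepA]
    rw [if_neg (by tauto)]
    exact ih

-- A's rescan loop finds the first entry whose value equals the target
lemma pvFoldA_find (t : Int) (l : List (Int × Int × Int)) (hk : ∀ e ∈ l, e.1 ≠ 0) :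
    l.foldl (pvStepA t) (0, 0) =
      match l.find? (fun e => decide (e.2.2 = t)) with
      | some e => (e.1, e.2.1)
      | none => ((0 : Int), (0 : Int)) := by
  induction l with
  | nil => rfl
  | cons e r ih =>
    simp only [List.foldl_cons, pvStepA]
    by_cases h : e.2.2 = t
    · rw [if_pos (⟨h, trivial⟩ : e.2.2 = t ∧ True),
        List.find?_cons_of_pos (by simpa using h)]
      rw [pvFoldA_frozen t r _ (by simpa using hk e (by simp))]
      simp
    · rw [if_neg (by tauto), List.find?_cons_of_neg (by simpa using h)]
      exact ih (fun e he => hk e (by simp [he]))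

lemma pvEntries_fst (matrix : List (List Int)) :
    ∀ e ∈ pvEntries matrix, e.1 ≠ 0 := by
  intro e he
  simp only [pvEntries, List.mem_flatMap, List.mem_map] at he
  obtain ⟨k, hk, j, _, rfl⟩ := he
  have := (PySem.List.mem_pyRange_one).1 hk
  omega

lemma pvEntries_ne_nil (matrix : List (List Int))
    (hm : 2 < matrix.length) (hn : 2 < (matrix.headD []).length) :
    pvEntries matrix ≠ [] := by
  have hk : (2 : Int) ∈ PySem.List.pyRange 2 (matrix.length : Int) 1 :=
    (PySem.List.mem_pyRange_one).2 ⟨le_refl _, by exact_mod_cast hm⟩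
  have hj : (2 : Int) ∈ PySem.List.pyRange 2 ((matrix.headD []).length : Int) 1 :=
    (PySem.List.mem_pyRange_one).2 ⟨le_refl _, by exact_mod_cast hn⟩
  intro h
  have : (2, 2, pvVal matrix 2 2) ∈ pvEntries matrix := by
    simp only [pvEntries, List.mem_flatMap, List.mem_map]
    exact ⟨2, hk, 2, hj, rfl⟩
  simp [h] at this

-- A's value_list is the values of the entries
lemma pvA_value_list (matrix : List (List Int)) :
    (PySem.List.pyRange 2 (matrix.length : Int) 1).foldl (fun acc k =>
      (PySem.List.pyRange 2 ((matrix.headD []).length : Int) 1).foldl (fun acc j =>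
        acc ++ [(PySem.List.pyGet? ((PySem.List.pyGet? matrix k).getD []) j).getD 0]) acc) []
    = (pvEntries matrix).map (fun e => e.2.2) := by
  have h1 : ∀ (acc : List Int) (k : Int),
      (PySem.List.pyRange 2 ((matrix.headD []).length : Int) 1).foldl (fun acc j =>
        acc ++ [(PySem.List.pyGet? ((PySem.List.pyGet? matrix k).getD []) j).getD 0]) acc
      = acc ++ (PySem.List.pyRange 2 ((matrix.headD []).length : Int) 1).map (pvVal matrix k) := by
    intro acc k
    exact PySem.List.foldl_append_singleton_eq_map _ _ _
  calc _ = (PySem.List.pyRange 2 (matrix.length : Int) 1).foldl (fun acc k =>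
            acc ++ (PySem.List.pyRange 2 ((matrix.headD []).length : Int) 1).map (pvVal matrix k)) [] := by
            exact PySem.List.foldl_congr_mem _ _ _ _ (fun acc k hk => h1 acc k)
    _ = (PySem.List.pyRange 2 (matrix.length : Int) 1).flatMap (fun k =>
            (PySem.List.pyRange 2 ((matrix.headD []).length : Int) 1).map (pvVal matrix k)) := by
            rw [PySem.List.foldl_append_eq_flatMap]; rfl
    _ = (pvEntries matrix).map (fun e => e.2.2) := by
            simp only [pvEntries, List.map_flatMap, List.map_map]; rfl

-- A's second pass is the stepA fold over the entries
lemma pvA_second (matrix : List (List Int)) (t : Int) :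
    (PySem.List.pyRange 2 (matrix.length : Int) 1).foldl (fun p k =>
      (PySem.List.pyRange 2 ((matrix.headD []).length : Int) 1).foldl (fun (p : Int × Int) j =>
        if (PySem.List.pyGet? ((PySem.List.pyGet? matrix k).getD []) j).getD 0 = t ∧ p.1 = 0
        then (p.1 + k, p.2 + j) else p) p) ((0 : Int), (0 : Int))
    = (pvEntries matrix).foldl (pvStepA t) (0, 0) := by
  simp only [pvEntries, List.foldl_flatMap]
  refine PySem.List.foldl_congr_mem _ _ _ _ (fun p k _ => ?_)
  rw [List.foldl_map]
  rfl

-- B's nested loop is the stepB fold over the entries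
lemma pvB_fold (matrix : List (List Int)) :
    (PySem.List.pyRange 2 (matrix.length : Int) 1).foldl (fun b k =>
      let row := (PySem.List.pyGet? matrix k).getD []
      (PySem.List.pyRange 2 ((matrix.headD []).length : Int) 1).foldl (fun b j =>
        let v := (PySem.List.pyGet? row j).getD 0
        match b with
        | none => some (k, j, v)
        | some c => if v > c.2.2 then some (k, j, v) else b) b) none
    = (pvEntries matrix).foldl (fun b e => match b with
        | none => some e
        | some c => if e.2.2 > c.2.2 then some e else b) none := by
  simp only [pvEntries, List.foldl_flatMap]
  refine PySem.List.foldl_congr_mem _ _ _ _ (fun b k _ => ?_)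
  rw [List.foldl_map]
  rfl

-- ===== VERDICT (by name: the statement is the Claim_ definition above) =====
theorem find_highest_index_spec : Claim_equal_find_highest_index := by
  intro matrix _ hpre
  obtain ⟨hm, hn, -⟩ := hpre
  unfold Spec_find_highest_index
  simp only [find_highest_index, find_highest_index_alt]
  rw [pvA_value_list, pvA_second, pvB_fold]
  obtain ⟨e₀, rest, hE⟩ := List.exists_cons_of_ne_nil (pvEntries_ne_nil matrix hm hn)
  rw [hE]
  have hmax : (PySem.List.max? ((e₀ :: rest).map (fun e => e.2.2)) (fun x => x)).getD 0
      = rest.foldl (fun a e => max a e.2.2) e₀.2.2 := by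
    rw [List.map_cons, PySem.List.max?_id_cons, Option.getD_some, List.foldl_map]
  rw [hmax]
  have hA := pvFoldA_find (rest.foldl (fun a e => max a e.2.2) e₀.2.2) (e₀ :: rest)
    (by rw [← hE]; exact pvEntries_fst matrix)
  rw [pvPick_find] at hA
  simp only [List.foldl_cons] at hA ⊢
  rw [hA, pvFoldB_some]
  rw [← pvPick_val]
  simp
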